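-- pv_equiv track=rewrite | github.com/hackernimit01-dotcom/siem-dashboard-nikk | app.py | calculate_vulnerability_metrics
-- ===== SOURCE A (Python) =====
-- from typing import Any, Dict, List, Optional, cast
--
-- def calculate_vulnerability_metrics(
--     vulnerabilities_data: List[Dict[str, Any]],
-- ) -> Dict[str, Any]:
--     """Compute vulnerability counts by severity and workflow state."""
--     severity_counts = {"critical": 0, "high": 0, "medium": 0, "low": 0}
--     status_counts = {"open": 0, "in_progress": 0, "fixed": 0}
--
--     for vulnerability in vulnerabilities_data:
--         status = str(vulnerability.get("status", "")).lower()
--         severity = str(vulnerability.get("severity", "")).lower()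
--         if status in status_counts:
--             status_counts[status] += 1
--         if status in {"open", "in_progress"} and severity in severity_counts:
--             severity_counts[severity] += 1
--
--     return {
--         "critical_active": severity_counts["critical"],
--         "high_active": severity_counts["high"],
--         "medium_active": severity_counts["medium"],
--         "low_active": severity_counts["low"],
--         "open_total": status_counts["open"],
--         "in_progress_total": status_counts["in_progress"],
--         "fixed_total": status_counts["fixed"],
--         "active_total": status_counts["open"] + status_counts["in_progress"],
--     }
-- ===== SOURCE B (Python) =====
-- def calculate_vulnerability_metrics(vulnerabilities_data):
--     """Compute vulnerability counts by severity and workflow state.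
--
--     Divide-and-conquer: each vulnerability maps to a full metrics dict of
--     0/1 contributions; halves are combined by pointwise addition (the
--     metrics form a monoid under key-wise sum, so the split order is
--     irrelevant)."""
--
--     def single(v):
--         status = str(v.get("status", "")).lower()
--         severity = str(v.get("severity", "")).lower()
--         active = status in ("open", "in_progress")
--         return {
--             "critical_active": int(active and severity == "critical"),
--             "high_active": int(active and severity == "high"),
--             "medium_active": int(active and severity == "medium"),
--             "low_active": int(active and severity == "low"),
--             "open_total": int(status == "open"),
--             "in_progress_total": int(status == "in_progress"),
--             "fixed_total": int(status == "fixed"),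
--             "active_total": int(active),
--         }
--
--     def go(data):
--         if len(data) == 0:
--             return {
--                 "critical_active": 0, "high_active": 0, "medium_active": 0,
--                 "low_active": 0, "open_total": 0, "in_progress_total": 0,
--                 "fixed_total": 0, "active_total": 0,
--             }
--         if len(data) == 1:
--             return single(data[0])
--         mid = len(data) // 2
--         left = go(data[:mid])
--         right = go(data[mid:])
--         return {k: left[k] + right[k] for k in left}
--
--     return go(vulnerabilities_data)
-- ===== Notes on version B (the rewrite author's own statement) =====
-- stated objective: alternative
-- what changed: Replaces A's single stateful loop over two mutable count dicts with a divide-and-conquer monoid reduction: each vulnerability is mapped to a full 0/1 metrics dict and halves are merged by pointwise addition.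
import Mathlib
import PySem

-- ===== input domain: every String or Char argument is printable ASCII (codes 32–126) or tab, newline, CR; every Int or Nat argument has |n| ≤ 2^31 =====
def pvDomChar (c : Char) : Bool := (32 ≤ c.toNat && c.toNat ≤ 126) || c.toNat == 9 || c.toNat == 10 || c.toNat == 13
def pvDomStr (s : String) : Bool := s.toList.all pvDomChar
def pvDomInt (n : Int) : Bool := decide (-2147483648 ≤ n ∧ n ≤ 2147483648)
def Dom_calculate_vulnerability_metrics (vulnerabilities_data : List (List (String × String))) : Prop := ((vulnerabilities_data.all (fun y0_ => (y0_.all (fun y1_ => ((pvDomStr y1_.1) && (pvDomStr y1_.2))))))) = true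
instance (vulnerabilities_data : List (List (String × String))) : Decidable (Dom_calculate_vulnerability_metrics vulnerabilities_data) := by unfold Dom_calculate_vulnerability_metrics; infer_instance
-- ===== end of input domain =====

-- B replaces A's single stateful loop over two mutable count dicts with a divide-and-conquer
-- monoid reduction (per-item 0/1 metrics dicts merged by pointwise addition); same O(n) cost, alternative.


-- ===== PORT A =====
-- str(v.get(k, "")).lower(): values are strings, so str() is the identity
def cvmGet (vuln : List (String × String)) (key : String) : String :=
  PySem.Str.lower ((PySem.Dict.mk vuln).getD key "")

-- one iteration of A's for-loop over the pair (severity_counts, status_counts)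
def cvmStep (st : PySem.Dict String Int × PySem.Dict String Int)
    (vulnerability : List (String × String)) : PySem.Dict String Int × PySem.Dict String Int :=
  let status := cvmGet vulnerability "status"
  let severity := cvmGet vulnerability "severity"
  let status_counts := if st.2.contains status then st.2.modify status 0 (· + 1) else st.2
  let severity_counts :=
    if (status == "open" || status == "in_progress") && st.1.contains severity then
      st.1.modify severity 0 (· + 1)
    else st.1
  (severity_counts, status_counts)

def calculate_vulnerability_metrics (vulnerabilities_data : List (List (String × String))) : List (String × Int) :=
  let severity_counts : PySem.Dict String Int :=
    PySem.Dict.mk [("critical", 0), ("high", 0), ("medium", 0), ("low", 0)]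
  let status_counts : PySem.Dict String Int :=
    PySem.Dict.mk [("open", 0), ("in_progress", 0), ("fixed", 0)]
  let r := vulnerabilities_data.foldl cvmStep (severity_counts, status_counts)
  [("critical_active", r.1.getD "critical" 0),
   ("high_active", r.1.getD "high" 0),
   ("medium_active", r.1.getD "medium" 0),
   ("low_active", r.1.getD "low" 0),
   ("open_total", r.2.getD "open" 0),
   ("in_progress_total", r.2.getD "in_progress" 0),
   ("fixed_total", r.2.getD "fixed" 0),
   ("active_total", r.2.getD "open" 0 + r.2.getD "in_progress" 0)]

-- ===== PORT B =====
def cvmNorm (vuln : List (String × String)) (key : String) : String :=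
  PySem.Str.lower ((PySem.Dict.mk vuln).getD key "")

-- single(v): the full metrics dict of one vulnerability, entries 0/1
def cvmSingle (v : List (String × String)) : List (String × Int) :=
  let status := cvmNorm v "status"
  let severity := cvmNorm v "severity"
  let active := status == "open" || status == "in_progress"
  [("critical_active", if active && severity == "critical" then 1 else 0),
   ("high_active", if active && severity == "high" then 1 else 0),
   ("medium_active", if active && severity == "medium" then 1 else 0),
   ("low_active", if active && severity == "low" then 1 else 0),
   ("open_total", if status == "open" then 1 else 0),
   ("in_progress_total", if status == "in_progress" then 1 else 0),
   ("fixed_total", if status == "fixed" then 1 else 0),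
   ("active_total", if active then 1 else 0)]

def cvmZero : List (String × Int) :=
  [("critical_active", 0), ("high_active", 0), ("medium_active", 0),
   ("low_active", 0), ("open_total", 0), ("in_progress_total", 0),
   ("fixed_total", 0), ("active_total", 0)]

-- {k: left[k] + right[k] for k in left}: both sides carry the same keys in the same
-- order (by construction), so the merge is a key-preserving pointwise sum
def cvmMerge (left right : List (String × Int)) : List (String × Int) :=
  List.zipWith (fun a b => (a.1, a.2 + b.2)) left right

-- go(data): split at len//2 and merge; slices data[:mid] / data[mid:] with
-- 0 ≤ mid ≤ len are exactly List.take / List.drop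
def cvmGo : List (List (String × String)) → List (String × Int)
  | [] => cvmZero
  | [v] => cvmSingle v
  | v₁ :: v₂ :: rest =>
    let data := v₁ :: v₂ :: rest
    let mid := data.length / 2
    cvmMerge (cvmGo (data.take mid)) (cvmGo (data.drop mid))
termination_by data => data.length
decreasing_by
  · simp only [List.length_take, List.length_cons]; omega
  · simp only [List.length_drop, List.length_cons]; omega

def calculate_vulnerability_metrics_alt (vulnerabilities_data : List (List (String × String))) : List (String × Int) :=
  cvmGo vulnerabilities_data

-- ===== PRECONDITION & SPEC =====
def Spec_calculate_vulnerability_metrics (vulnerabilities_data : List (List (String × String))) (out : List (String × Int)) : Prop := out = calculate_vulnerability_metrics_alt vulnerabilities_data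
instance (vulnerabilities_data : List (List (String × String))) (out : List (String × Int)) : Decidable (Spec_calculate_vulnerability_metrics vulnerabilities_data out) := by unfold Spec_calculate_vulnerability_metrics; infer_instance

-- ===== CLAIM (what is proved, stated in full; the proofs are below) =====
def Claim_equal_calculate_vulnerability_metrics : Prop := ∀ (vulnerabilities_data : List (List (String × String))), Dom_calculate_vulnerability_metrics vulnerabilities_data → Spec_calculate_vulnerability_metrics vulnerabilities_data (calculate_vulnerability_metrics vulnerabilities_data)

-- ===== LEMMAS AND PROOFS =====

-- the canonical value both ports compute: eight countP's over the input
def cvmActiveP (v : List (String × String)) : Bool :=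
  cvmNorm v "status" == "open" || cvmNorm v "status" == "in_progress"

def cvmCanon (l : List (List (String × String))) : List (String × Int) :=
  [("critical_active", (l.countP (fun v => cvmActiveP v && cvmNorm v "severity" == "critical") : Int)),
   ("high_active", (l.countP (fun v => cvmActiveP v && cvmNorm v "severity" == "high") : Int)),
   ("medium_active", (l.countP (fun v => cvmActiveP v && cvmNorm v "severity" == "medium") : Int)),
   ("low_active", (l.countP (fun v => cvmActiveP v && cvmNorm v "severity" == "low") : Int)),
   ("open_total", (l.countP (fun v => cvmNorm v "status" == "open") : Int)),
   ("in_progress_total", (l.countP (fun v => cvmNorm v "status" == "in_progress") : Int)),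
   ("fixed_total", (l.countP (fun v => cvmNorm v "status" == "fixed") : Int)),
   ("active_total", (l.countP cvmActiveP : Int))]

-- B = canonical: the merge adds countP's of the two slices, which concatenate to l
theorem cvmMerge_canon (l₁ l₂ : List (List (String × String))) :
    cvmMerge (cvmCanon l₁) (cvmCanon l₂) = cvmCanon (l₁ ++ l₂) := by
  simp [cvmMerge, cvmCanon, List.countP_append]

theorem cvmGo_eq_canon (l : List (List (String × String))) : cvmGo l = cvmCanon l := by
  induction l using cvmGo.induct with
  | case1 => simp [cvmGo, cvmZero, cvmCanon]
  | case2 v =>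
    simp only [cvmGo, cvmSingle, cvmCanon, cvmActiveP, List.countP_cons, List.countP_nil]
    by_cases h : (cvmNorm v "status" == "open" || cvmNorm v "status" == "in_progress") = true <;>
      simp [h] <;> split_ifs <;> simp_all
  | case3 v₁ v₂ rest _ _ ih1 ih2 =>
    simp only [cvmGo]
    rw [ih1, ih2, cvmMerge_canon, List.take_append_drop]

-- open-count + in_progress-count = active-count (a status string equals at most one of them)
theorem cvm_countP_active (l : List (List (String × String))) :
    (l.countP (fun v => cvmNorm v "status" == "open") : Int)
      + (l.countP (fun v => cvmNorm v "status" == "in_progress") : Int)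
      = (l.countP cvmActiveP : Int) := by
  induction l with
  | nil => simp
  | cons v l ih =>
    simp only [List.countP_cons, cvmActiveP]
    by_cases h1 : cvmNorm v "status" = "open" <;> by_cases h2 : cvmNorm v "status" = "in_progress" <;>
      simp_all <;> push_cast <;> omega

-- a guarded modify keeps the key-membership function, provided the guard implies the key exists
theorem cvm_contains_guard (d : PySem.Dict String Int) (e : String) (b : Bool) (C : String → Bool)
    (h : ∀ k, d.contains k = C k) (himp : b = true → C e = true) (k : String) :
    (if b then d.modify e 0 (· + 1) else d).contains k = C k := by
  cases hb : b
  · simp [h]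
  · simp [PySem.Dict.contains_modify, h]
    by_cases hke : k = e
    · subst hke; simp [himp hb]
    · simp [hke]

-- value of a guarded modify at a key known to exist
theorem cvm_getD_guard (d : PySem.Dict String Int) (e k : String) (b : Bool)
    (hk : d.contains k = true) :
    (if b && d.contains e then d.modify e 0 (· + 1) else d).getD k 0
      = d.getD k 0 + (if b && (e == k) then 1 else 0) := by
  by_cases hek : e = k
  · subst hek
    cases hb : b
    · simp
    · simp [hk]
  · have hbe : (e == k) = false := by simp [hek]
    rw [hbe]
    simp only [Bool.and_false, Bool.false_eq_true, if_false, add_zero]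
    split_ifs with hc
    · rw [PySem.Dict.getD_modify]
      simp [Ne.symm hek]
    · rfl

theorem cvm_fold_inv (l : List (List (String × String))) :
    ∀ (d1 d2 : PySem.Dict String Int),
    (∀ k, d1.contains k = ("critical" == k || "high" == k || "medium" == k || "low" == k)) →
    (∀ k, d2.contains k = ("open" == k || "in_progress" == k || "fixed" == k)) →
    (∀ sev, ("critical" == sev || "high" == sev || "medium" == sev || "low" == sev) = true →
      (l.foldl cvmStep (d1, d2)).1.getD sev 0
        = d1.getD sev 0
          + (l.countP (fun v => cvmActiveP v && cvmNorm v "severity" == sev) : Int))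
    ∧ (∀ st, ("open" == st || "in_progress" == st || "fixed" == st) = true →
      (l.foldl cvmStep (d1, d2)).2.getD st 0
        = d2.getD st 0 + (l.countP (fun v => cvmNorm v "status" == st) : Int)) := by
  induction l with
  | nil => intro d1 d2 _ _; constructor <;> intro k _ <;> simp
  | cons v l ih =>
    intro d1 d2 h1 h2
    have hstep : cvmStep (d1, d2) v =
        ((if cvmActiveP v && d1.contains (cvmNorm v "severity") then
            d1.modify (cvmNorm v "severity") 0 (· + 1) else d1),
         (if true && d2.contains (cvmNorm v "status") then
            d2.modify (cvmNorm v "status") 0 (· + 1) else d2)) := rfl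
    have hfold : (v :: l).foldl cvmStep (d1, d2) = l.foldl cvmStep (cvmStep (d1, d2) v) := rfl
    rw [hfold, hstep]
    have h1' : ∀ k, (if cvmActiveP v && d1.contains (cvmNorm v "severity") then
        d1.modify (cvmNorm v "severity") 0 (· + 1) else d1).contains k
        = ("critical" == k || "high" == k || "medium" == k || "low" == k) :=
      cvm_contains_guard d1 _ _ _ h1
        (fun hb => by rw [← h1]; exact (Bool.and_eq_true _ _ |>.mp hb).2)
    have h2' : ∀ k, (if true && d2.contains (cvmNorm v "status") then
        d2.modify (cvmNorm v "status") 0 (· + 1) else d2).contains k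
        = ("open" == k || "in_progress" == k || "fixed" == k) :=
      cvm_contains_guard d2 _ _ _ h2
        (fun hb => by rw [← h2]; exact (Bool.and_eq_true _ _ |>.mp hb).2)
    obtain ⟨ihA, ihB⟩ := ih _ _ h1' h2'
    constructor
    · intro sev hsev
      rw [ihA sev hsev, List.countP_cons]
      have hk : d1.contains sev = true := by rw [h1 sev]; exact hsev
      rw [cvm_getD_guard d1 _ sev (cvmActiveP v) hk]
      by_cases hav : cvmActiveP v = true
      · by_cases hes : cvmNorm v "severity" = sev
        · simp [hav, hes]; ring
        · simp [hav, hes]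
      · have hav' : cvmActiveP v = false := by simpa using hav
        simp [hav']
    · intro st hst
      rw [ihB st hst, List.countP_cons]
      have hk : d2.contains st = true := by rw [h2 st]; exact hst
      rw [cvm_getD_guard d2 _ st true hk]
      by_cases hss : cvmNorm v "status" = st
      · simp [hss]; ring
      · simp [hss]

-- ===== VERDICT (by name: the statement is the Claim_ definition above) =====
theorem calculate_vulnerability_metrics_spec : Claim_equal_calculate_vulnerability_metrics := by
  intro data _
  unfold Spec_calculate_vulnerability_metrics
  simp only [calculate_vulnerability_metrics, calculate_vulnerability_metrics_alt]
  rw [cvmGo_eq_canon]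
  have h1 : ∀ k, (PySem.Dict.mk [("critical", (0:Int)), ("high", 0), ("medium", 0), ("low", 0)]).contains k
      = ("critical" == k || "high" == k || "medium" == k || "low" == k) := by
    intro k; simp [PySem.Dict.contains_mk, Bool.or_assoc]
  have h2 : ∀ k, (PySem.Dict.mk [("open", (0:Int)), ("in_progress", 0), ("fixed", 0)]).contains k
      = ("open" == k || "in_progress" == k || "fixed" == k) := by
    intro k; simp [PySem.Dict.contains_mk, Bool.or_assoc]
  obtain ⟨hA, hB⟩ := cvm_fold_inv data _ _ h1 h2
  rw [hA "critical" (by decide), hA "high" (by decide), hA "medium" (by decide),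
      hA "low" (by decide), hB "open" (by decide), hB "in_progress" (by decide),
      hB "fixed" (by decide)]
  simp [cvmCanon]
  have e1 : (PySem.Dict.mk [("open", (0:Int)), ("in_progress", 0), ("fixed", 0)]).getD "open" 0 = 0 := by decide
  have e2 : (PySem.Dict.mk [("open", (0:Int)), ("in_progress", 0), ("fixed", 0)]).getD "in_progress" 0 = 0 := by decide
  refine ⟨by decide, by decide, by decide, by decide, by decide, by decide, by decide, ?_⟩
  rw [e1, e2]
  rw [← cvm_countP_active]
  ring
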